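-- pv_equiv track=rewrite | github.com/Wulfic/Cicada3301 | tools/archive/exhaustive_cipher_test.py | decrypt_autokey
-- ===== SOURCE A (Python) =====
-- LETTERS = ['F', 'U', 'TH', 'O', 'R', 'C', 'G', 'W', 'H', 'N',
--            'I', 'J', 'EO', 'P', 'X', 'S', 'T', 'B', 'E', 'M',
--            'L', 'NG', 'OE', 'D', 'A', 'AE', 'Y', 'IA', 'EA']
--
-- def idx_to_letter(idx):
--     return LETTERS[idx % 29]
--
-- def decrypt_autokey(cipher, start_key, use_plaintext=True):
--     """Autokey cipher where key is the plaintext or ciphertext"""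
--     result = []
--     key = list(start_key)
--
--     for i, c in enumerate(cipher):
--         k = key[i % len(key)] if i < len(key) else (result[i - len(key)] if use_plaintext else cipher[i - len(key)])
--         p = (c - k) % 29
--         result.append(p)
--
--     return ''.join(idx_to_letter(p) for p in result)
-- ===== SOURCE B (Python) =====
-- LETTERS = ['F', 'U', 'TH', 'O', 'R', 'C', 'G', 'W', 'H', 'N',
--            'I', 'J', 'EO', 'P', 'X', 'S', 'T', 'B', 'E', 'M',
--            'L', 'NG', 'OE', 'D', 'A', 'AE', 'Y', 'IA', 'EA']
--
-- def decrypt_autokey(cipher, start_key, use_plaintext=True):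
--     """Stride decomposition: with key length m the positions split into m
--     independent residue columns.  In plaintext mode each column is decrypted
--     by its own local chain seeded from its key letter; in ciphertext mode the
--     keystream is just start_key followed by cipher, so each output is a
--     stateless pairwise difference.  No growing key buffer is ever built."""
--     n, m = len(cipher), len(start_key)
--     out = [0] * n
--     if use_plaintext:
--         for r in range(m):
--             k = start_key[r]
--             i = r
--             while i < n:
--                 k = (cipher[i] - k) % 29
--                 out[i] = k
--                 i += m
--     else:
--         i = 0
--         while i < n:
--             k = start_key[i] if i < m else cipher[i - m]
--             out[i] = (cipher[i] - k) % 29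
--             i += 1
--     return ''.join(LETTERS[p] for p in out)
-- ===== Notes on version B (the rewrite author's own statement) =====
-- stated objective: alternative
-- what changed: B never builds a growing result/key buffer: it splits the positions into the len(start_key) independent residue columns and decrypts each column by its own local chain (plaintext mode), while ciphertext mode degenerates to a single stateless pass of pairwise differences against the keystream start_key + cipher.
import Mathlib
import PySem

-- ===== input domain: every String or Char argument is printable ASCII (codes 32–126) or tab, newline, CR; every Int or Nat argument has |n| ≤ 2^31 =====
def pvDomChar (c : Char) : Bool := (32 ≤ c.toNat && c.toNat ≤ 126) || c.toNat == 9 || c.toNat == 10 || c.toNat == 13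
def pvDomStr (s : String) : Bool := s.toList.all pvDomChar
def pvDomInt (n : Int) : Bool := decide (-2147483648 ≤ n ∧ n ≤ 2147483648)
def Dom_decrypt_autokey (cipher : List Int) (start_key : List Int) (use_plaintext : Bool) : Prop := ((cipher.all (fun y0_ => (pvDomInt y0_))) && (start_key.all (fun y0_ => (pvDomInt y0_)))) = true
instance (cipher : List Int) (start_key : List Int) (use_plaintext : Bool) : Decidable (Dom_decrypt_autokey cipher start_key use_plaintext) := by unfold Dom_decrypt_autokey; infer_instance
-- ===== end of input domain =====

-- B decrypts the residue columns independently (ciphertext mode becomes a stateless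
-- pairwise-difference pass) instead of A's sequential back-indexing; objective: alternative, same cost.

-- ===== PORT A =====
def pvLETTERS : List String :=
  ["F", "U", "TH", "O", "R", "C", "G", "W", "H", "N",
   "I", "J", "EO", "P", "X", "S", "T", "B", "E", "M",
   "L", "NG", "OE", "D", "A", "AE", "Y", "IA", "EA"]

def idx_to_letter (idx : Int) : String :=
  (PySem.List.pyGet? pvLETTERS (PySem.Int.mod idx 29)).getD ""

-- loop of A: 'for i, c in enumerate(cipher)', accumulating result
def pvALoop (start_key cipher : List Int) (use_plaintext : Bool) :
    List Int → Nat → List Int → List Int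
  | [], _, result => result
  | c :: rs, i, result =>
    let k : Int :=
      if (i : Int) < (start_key.length : Int) then
        (PySem.List.pyGet? start_key (PySem.Int.mod (i : Int) (start_key.length : Int))).getD 0
      else if use_plaintext then
        (PySem.List.pyGet? result ((i : Int) - (start_key.length : Int))).getD 0
      else
        (PySem.List.pyGet? cipher ((i : Int) - (start_key.length : Int))).getD 0
    pvALoop start_key cipher use_plaintext rs (i + 1) (result ++ [PySem.Int.mod (c - k) 29])

def decrypt_autokey (cipher : List Int) (start_key : List Int) (use_plaintext : Bool) : String :=
  PySem.Str.join "" ((pvALoop start_key cipher use_plaintext cipher 0 []).map idx_to_letter)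

-- ===== PORT B =====
-- inner 'while i < n' of B's plaintext branch: one residue column with its local chain k;
-- fuel = n bounds the iteration count (the loop steps i by m ≥ 1, so n iterations suffice)
def pvBCol (cipher : List Int) (n m : Nat) : Nat → Nat → Int → List Int → List Int
  | 0, _, _, out => out
  | fuel + 1, i, k, out =>
    if i < n then
      let k' := PySem.Int.mod ((PySem.List.pyGet? cipher (i : Int)).getD 0 - k) 29
      pvBCol cipher n m fuel (i + m) k' (out.set i k')
    else out

-- 'while i < n' of B's ciphertext branch: stateless pairwise differences
def pvBDiff (cipher sk : List Int) (n m : Nat) : Nat → Nat → List Int → List Int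
  | 0, _, out => out
  | fuel + 1, i, out =>
    if i < n then
      let k : Int :=
        if i < m then (PySem.List.pyGet? sk (i : Int)).getD 0
        else (PySem.List.pyGet? cipher ((i : Int) - (m : Int))).getD 0
      pvBDiff cipher sk n m fuel (i + 1)
        (out.set i (PySem.Int.mod ((PySem.List.pyGet? cipher (i : Int)).getD 0 - k) 29))
    else out

def decrypt_autokey_alt (cipher : List Int) (start_key : List Int) (use_plaintext : Bool) : String :=
  let n := cipher.length
  let m := start_key.length
  let out0 : List Int := List.replicate n 0
  let out :=
    if use_plaintext then
      (List.range m).foldl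
        (fun out r => pvBCol cipher n m n r ((PySem.List.pyGet? start_key (r : Int)).getD 0) out)
        out0
    else pvBDiff cipher start_key n m n 0 out0
  PySem.Str.join "" (out.map (fun p => (PySem.List.pyGet? pvLETTERS p).getD ""))

-- ===== PRECONDITION & SPEC =====
-- Pre_ excludes exactly the inputs on which A raises IndexError (empty start_key,
-- nonempty cipher, use_plaintext=True: A reads result[i] before it exists).
def Pre_decrypt_autokey (cipher : List Int) (start_key : List Int) (use_plaintext : Bool) : Prop :=
  start_key ≠ [] ∨ cipher = [] ∨ use_plaintext = false
instance (cipher : List Int) (start_key : List Int) (use_plaintext : Bool) : Decidable (Pre_decrypt_autokey cipher start_key use_plaintext) := by unfold Pre_decrypt_autokey; infer_instance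

def pvWitness_decrypt_autokey : List Int × List Int × Bool := ([1, 2, 3], [5], true)

def Spec_decrypt_autokey (cipher : List Int) (start_key : List Int) (use_plaintext : Bool) (out : String) : Prop := out = decrypt_autokey_alt cipher start_key use_plaintext
instance (cipher : List Int) (start_key : List Int) (use_plaintext : Bool) (out : String) : Decidable (Spec_decrypt_autokey cipher start_key use_plaintext out) := by unfold Spec_decrypt_autokey; infer_instance

-- ===== CLAIM (what is proved, stated in full; the proofs are below) =====
def Claim_equal_decrypt_autokey : Prop := ∀ (cipher : List Int) (start_key : List Int) (use_plaintext : Bool), Dom_decrypt_autokey cipher start_key use_plaintext → Pre_decrypt_autokey cipher start_key use_plaintext → Spec_decrypt_autokey cipher start_key use_plaintext (decrypt_autokey cipher start_key use_plaintext)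

-- ===== LEMMAS AND PROOFS =====

-- the output value at position i, as both programs compute it (proof-only helper)
def pvSpec (cipher sk : List Int) (use : Bool) (i : Nat) : Int :=
  if _h1 : i < sk.length then
    PySem.Int.mod ((PySem.List.pyGet? cipher (i : Int)).getD 0
      - (PySem.List.pyGet? sk (i : Int)).getD 0) 29
  else if _h2 : sk.length = 0 then 0
  else if use then
    PySem.Int.mod ((PySem.List.pyGet? cipher (i : Int)).getD 0
      - pvSpec cipher sk use (i - sk.length)) 29
  else
    PySem.Int.mod ((PySem.List.pyGet? cipher (i : Int)).getD 0
      - (PySem.List.pyGet? cipher ((i : Int) - (sk.length : Int))).getD 0) 29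
termination_by i
decreasing_by omega

theorem pvMod29_idem (x : Int) : PySem.Int.mod (PySem.Int.mod x 29) 29 = PySem.Int.mod x 29 := by
  rw [PySem.Int.mod_eq_emod_of_pos (by omega), PySem.Int.mod_eq_emod_of_pos (by omega)]
  exact Int.emod_emod_of_dvd x (dvd_refl 29)

theorem pvMod29_zero : PySem.Int.mod 0 29 = 0 := by
  rw [PySem.Int.mod_eq_emod_of_pos (by omega)]
  rfl

theorem pvSpec_mod (cipher sk : List Int) (use : Bool) (i : Nat) :
    PySem.Int.mod (pvSpec cipher sk use i) 29 = pvSpec cipher sk use i := by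
  rw [pvSpec]
  split_ifs <;> simp [pvMod29_idem, pvMod29_zero]

theorem pvA_char (sk cipher : List Int) (use : Bool)
    (hgood : sk ≠ [] ∨ use = false) :
    ∀ (rest : List Int) (i : Nat), i ≤ cipher.length → cipher.drop i = rest →
    pvALoop sk cipher use rest i ((List.range i).map (pvSpec cipher sk use))
      = (List.range cipher.length).map (pvSpec cipher sk use) := by
  intro rest
  induction rest with
  | nil =>
    intro i hi hdrop
    have hle : cipher.length ≤ i := by
      by_contra h
      have := List.drop_eq_nil_iff.mp hdrop
      omega
    have : i = cipher.length := by omega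
    subst this
    simp [pvALoop]
  | cons c rs ih =>
    intro i hi hdrop
    have hlt : i < cipher.length := by
      by_contra h
      have : cipher.drop i = [] := List.drop_eq_nil_of_le (by omega)
      simp [this] at hdrop
    have hc : cipher[i] = c := by
      have h0 : (cipher.drop i)[0]'(by simp [hdrop]) = c := by simp [hdrop]
      rwa [List.getElem_drop] at h0
    have hcget : (PySem.List.pyGet? cipher (i : Int)).getD 0 = c := by
      rw [PySem.List.pyGet?_natCast, List.getElem?_eq_getElem hlt, hc]
      rfl
    have hstep :
        PySem.Int.mod (c -
          (if (i : Int) < (sk.length : Int) then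
            (PySem.List.pyGet? sk (PySem.Int.mod (i : Int) (sk.length : Int))).getD 0
          else if use then
            (PySem.List.pyGet? ((List.range i).map (pvSpec cipher sk use))
              ((i : Int) - (sk.length : Int))).getD 0
          else
            (PySem.List.pyGet? cipher ((i : Int) - (sk.length : Int))).getD 0)) 29
        = pvSpec cipher sk use i := by
      by_cases h : i < sk.length
      · rw [if_pos (by exact_mod_cast h)]
        have hm : PySem.Int.mod (i : Int) (sk.length : Int) = ((i % sk.length : Nat) : Int) := by
          simp
        rw [hm, Nat.mod_eq_of_lt h, pvSpec, dif_pos h, hcget]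
      · rw [if_neg (by exact_mod_cast h)]
        have hsub : ((i : Int) - (sk.length : Int)) = ((i - sk.length : Nat) : Int) := by omega
        cases use with
        | true =>
          have hm0 : sk.length ≠ 0 := by
            have hsk : sk ≠ [] := by tauto
            simpa using hsk
          simp only [if_true]
          rw [hsub, PySem.List.pyGet?_natCast, List.getElem?_map,
              List.getElem?_range (by omega), pvSpec, dif_neg h, dif_neg hm0, if_pos rfl, hcget]
          rfl
        | false =>
          simp only [Bool.false_eq_true, if_false]
          by_cases hm0 : sk.length = 0
          · rw [pvSpec, dif_neg h, dif_pos hm0, hm0]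
            simp only [Nat.cast_zero, sub_zero, hcget, sub_self, pvMod29_zero]
          · rw [pvSpec, dif_neg h, dif_neg hm0, if_neg (by simp), hcget]
    rw [pvALoop]
    simp only [hstep]
    have hsucc : (List.range i).map (pvSpec cipher sk use) ++ [pvSpec cipher sk use i]
        = (List.range (i + 1)).map (pvSpec cipher sk use) := by
      rw [List.range_succ, List.map_append, List.map_cons, List.map_nil]
    rw [hsucc]
    exact ih (i + 1) (by omega) (by rw [← List.tail_drop, hdrop]; rfl)

theorem pvDvdShift (m i t : Nat) (hm : 1 ≤ m) (hne : t ≠ i) :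
    (i ≤ t ∧ m ∣ (t - i)) ↔ (i + m ≤ t ∧ m ∣ (t - (i + m))) := by
  constructor
  · rintro ⟨h1, hd⟩
    have hlt : i < t := by omega
    have hge : m ≤ t - i := Nat.le_of_dvd (by omega) hd
    refine ⟨by omega, ?_⟩
    have e : t - (i + m) = (t - i) - m := by omega
    rw [e]
    exact Nat.dvd_sub hd (dvd_refl m)
  · rintro ⟨h1, hd⟩
    have e : t - i = (t - (i + m)) + m := by omega
    exact ⟨by omega, by rw [e]; exact Nat.dvd_add hd (dvd_refl m)⟩

theorem pvColKey (m r t : Nat) (hr : r < m) :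
    (r ≤ t ∧ m ∣ (t - r)) ↔ t % m = r := by
  constructor
  · rintro ⟨h1, q, hq⟩
    have ht : t = m * q + r := by rw [← hq]; omega
    rw [ht, Nat.mul_add_mod]
    exact Nat.mod_eq_of_lt hr
  · intro h
    refine ⟨h ▸ Nat.mod_le t m, ⟨t / m, ?_⟩⟩
    have hd := Nat.div_add_mod t m
    rw [h] at hd
    generalize m * (t / m) = X at hd ⊢
    omega

theorem pvBCol_spec (cipher sk : List Int) (hm1 : 1 ≤ sk.length) (n : Nat) :
    ∀ (fuel i : Nat) (k : Int) (out : List Int),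
      n ≤ i + fuel * sk.length → out.length = n →
      k = (if i < sk.length then (PySem.List.pyGet? sk (i : Int)).getD 0
           else pvSpec cipher sk true (i - sk.length)) →
      (pvBCol cipher n sk.length fuel i k out).length = n ∧
      ∀ t, t < n → (pvBCol cipher n sk.length fuel i k out)[t]? =
        if i ≤ t ∧ sk.length ∣ (t - i) then some (pvSpec cipher sk true t) else out[t]? := by
  intro fuel
  induction fuel with
  | zero =>
    intro i k out hfuel hlen hk
    simp only [Nat.zero_mul, Nat.add_zero] at hfuel
    refine ⟨by simpa [pvBCol], ?_⟩
    intro t ht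
    rw [pvBCol, if_neg (by rintro ⟨h1, _⟩; omega)]
  | succ fuel ih =>
    intro i k out hfuel hlen hk
    rw [pvBCol]
    by_cases hin : i < n
    · rw [if_pos hin]
      have hkval : PySem.Int.mod ((PySem.List.pyGet? cipher (i : Int)).getD 0 - k) 29
          = pvSpec cipher sk true i := by
        rw [pvSpec]
        by_cases h : i < sk.length
        · rw [hk, if_pos h, dif_pos h]
        · rw [hk, if_neg h, dif_neg h, dif_neg (by omega), if_pos rfl]
      simp only [hkval]
      have hfuel' : n ≤ (i + sk.length) + fuel * sk.length := by
        have e : i + (fuel + 1) * sk.length = (i + sk.length) + fuel * sk.length := by ring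
        rw [e] at hfuel
        exact hfuel
      obtain ⟨ihlen, ihget⟩ := ih (i + sk.length) (pvSpec cipher sk true i)
        (out.set i (pvSpec cipher sk true i)) hfuel' (by simp [hlen])
        (by rw [if_neg (by omega)]; congr 1; omega)
      refine ⟨ihlen, ?_⟩
      intro t ht
      rw [ihget t ht]
      by_cases hti : t = i
      · subst hti
        rw [if_neg (by rintro ⟨h1, _⟩; omega), if_pos ⟨le_refl t, by simp⟩]
        rw [List.getElem?_set_self]
        omega
      · have hset : (out.set i (pvSpec cipher sk true i))[t]? = out[t]? :=
          List.getElem?_set_ne (fun h => hti h.symm)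
        rw [hset]
        by_cases hcond : i ≤ t ∧ sk.length ∣ (t - i)
        · rw [if_pos ((pvDvdShift sk.length i t hm1 hti).mp hcond), if_pos hcond]
        · rw [if_neg (fun hh => hcond ((pvDvdShift sk.length i t hm1 hti).mpr hh)),
              if_neg hcond]
    · rw [if_neg hin]
      refine ⟨hlen, ?_⟩
      intro t ht
      rw [if_neg (by rintro ⟨h1, _⟩; omega)]

theorem pvBOuter_spec (cipher sk : List Int) (n : Nat) :
    ∀ r, r ≤ sk.length →
      (((List.range r).foldl
        (fun out rr => pvBCol cipher n sk.length n rr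
          ((PySem.List.pyGet? sk (rr : Int)).getD 0) out)
        (List.replicate n (0 : Int))).length = n) ∧
      ∀ t, t < n →
        ((List.range r).foldl
          (fun out rr => pvBCol cipher n sk.length n rr
            ((PySem.List.pyGet? sk (rr : Int)).getD 0) out)
          (List.replicate n (0 : Int)))[t]? =
        if t % sk.length < r then some (pvSpec cipher sk true t) else some 0 := by
  intro r
  induction r with
  | zero =>
    intro _
    refine ⟨by simp, ?_⟩
    intro t ht
    simp only [List.range_zero, List.foldl_nil]
    rw [if_neg (by omega), List.getElem?_replicate, if_pos ht]
  | succ r ih =>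
    intro hr
    obtain ⟨ihlen, ihget⟩ := ih (by omega)
    have hm1 : 1 ≤ sk.length := by omega
    rw [List.range_succ, List.foldl_append, List.foldl_cons, List.foldl_nil]
    have hfuel : n ≤ r + n * sk.length := by
      calc n = n * 1 := (Nat.mul_one n).symm
        _ ≤ n * sk.length := Nat.mul_le_mul_left n hm1
        _ ≤ r + n * sk.length := Nat.le_add_left _ _
    obtain ⟨clen, cget⟩ := pvBCol_spec cipher sk hm1 n n r
      ((PySem.List.pyGet? sk (r : Int)).getD 0) _ hfuel ihlen
      (by rw [if_pos (by omega)])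
    refine ⟨clen, ?_⟩
    intro t ht
    rw [cget t ht]
    by_cases hc : t % sk.length = r
    · rw [if_pos ((pvColKey sk.length r t (by omega)).mpr hc), if_pos (by omega)]
    · rw [if_neg (fun hh => hc ((pvColKey sk.length r t (by omega)).mp hh)), ihget t ht]
      by_cases h2 : t % sk.length < r
      · rw [if_pos h2, if_pos (by omega)]
      · rw [if_neg h2, if_neg (by omega)]

theorem pvBDiff_spec (cipher sk : List Int) (n : Nat) :
    ∀ (fuel i : Nat) (out : List Int), n ≤ i + fuel → out.length = n →
      (pvBDiff cipher sk n sk.length fuel i out).length = n ∧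
      ∀ t, t < n → (pvBDiff cipher sk n sk.length fuel i out)[t]? =
        if i ≤ t then some (pvSpec cipher sk false t) else out[t]? := by
  intro fuel
  induction fuel with
  | zero =>
    intro i out hfuel hlen
    refine ⟨by simpa [pvBDiff], ?_⟩
    intro t ht
    rw [pvBDiff, if_neg (by omega)]
  | succ fuel ih =>
    intro i out hfuel hlen
    rw [pvBDiff]
    by_cases hin : i < n
    · rw [if_pos hin]
      have hkval : PySem.Int.mod ((PySem.List.pyGet? cipher (i : Int)).getD 0 -
          (if i < sk.length then (PySem.List.pyGet? sk (i : Int)).getD 0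
           else (PySem.List.pyGet? cipher ((i : Int) - (sk.length : Int))).getD 0)) 29
          = pvSpec cipher sk false i := by
        rw [pvSpec]
        by_cases h : i < sk.length
        · rw [if_pos h, dif_pos h]
        · rw [if_neg h, dif_neg h]
          by_cases h0 : sk.length = 0
          · rw [dif_pos h0, h0]
            simp [pvMod29_zero]
          · rw [dif_neg h0, if_neg (by simp)]
      simp only [hkval]
      obtain ⟨ihlen, ihget⟩ := ih (i + 1) (out.set i (pvSpec cipher sk false i))
        (by omega) (by simp [hlen])
      refine ⟨ihlen, ?_⟩
      intro t ht
      rw [ihget t ht]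
      by_cases hti : t = i
      · subst hti
        rw [if_neg (by omega), if_pos (le_refl t)]
        rw [List.getElem?_set_self]
        omega
      · have hset : (out.set i (pvSpec cipher sk false i))[t]? = out[t]? :=
          List.getElem?_set_ne (fun h => hti h.symm)
        rw [hset]
        by_cases hc : i ≤ t
        · rw [if_pos (by omega), if_pos hc]
        · rw [if_neg (by omega), if_neg hc]
    · rw [if_neg hin]
      refine ⟨hlen, ?_⟩
      intro t ht
      rw [if_neg (by omega)]

theorem pvB_out (cipher sk : List Int) (use : Bool) (hgood : sk ≠ [] ∨ use = false) :
    (if use then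
      (List.range sk.length).foldl
        (fun out r => pvBCol cipher cipher.length sk.length cipher.length r
          ((PySem.List.pyGet? sk (r : Int)).getD 0) out)
        (List.replicate cipher.length 0)
    else pvBDiff cipher sk cipher.length sk.length cipher.length 0
      (List.replicate cipher.length 0))
    = (List.range cipher.length).map (pvSpec cipher sk use) := by
  cases use with
  | false =>
    simp only [Bool.false_eq_true, if_false]
    obtain ⟨hlen, hget⟩ := pvBDiff_spec cipher sk cipher.length cipher.length 0
      (List.replicate cipher.length 0) (by omega) (by simp)
    apply List.ext_getElem?
    intro t
    by_cases ht : t < cipher.length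
    · rw [hget t ht, if_pos (by omega), List.getElem?_map, List.getElem?_range ht]
      rfl
    · rw [List.getElem?_eq_none (by omega), List.getElem?_eq_none (by simpa using by omega)]
  | true =>
    have hsk : sk ≠ [] := by tauto
    have hm1 : 1 ≤ sk.length := by
      have := List.length_pos_iff.mpr hsk
      omega
    simp only [if_true]
    obtain ⟨hlen, hget⟩ := pvBOuter_spec cipher sk cipher.length sk.length (le_refl _)
    apply List.ext_getElem?
    intro t
    by_cases ht : t < cipher.length
    · rw [hget t ht, if_pos (Nat.mod_lt t (by omega)), List.getElem?_map,
        List.getElem?_range ht]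
      rfl
    · rw [List.getElem?_eq_none (by omega), List.getElem?_eq_none (by simpa using by omega)]

-- ===== VERDICT (by name: the statement is the Claim_ definition above) =====
theorem decrypt_autokey_spec : Claim_equal_decrypt_autokey := by
  intro cipher sk use _ hpre
  unfold Spec_decrypt_autokey
  by_cases hgood : sk ≠ [] ∨ use = false
  · simp only [decrypt_autokey, decrypt_autokey_alt]
    rw [pvB_out cipher sk use hgood]
    have hA := pvA_char sk cipher use hgood cipher 0 (by omega) rfl
    simp only [List.range_zero, List.map_nil] at hA
    rw [hA]
    congr 1
    apply List.map_congr_left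
    intro x hx
    obtain ⟨t, -, rfl⟩ := List.mem_map.mp hx
    simp only [idx_to_letter, pvSpec_mod]
  · push_neg at hgood
    obtain ⟨h1, h2⟩ := hgood
    have hsk : sk = [] := h1
    have huse : use = true := by
      cases use with
      | false => exact absurd rfl h2
      | true => rfl
    subst hsk
    subst huse
    rcases hpre with h | h | h
    · exact absurd rfl h
    · subst h; decide
    · simp at h
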